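-- pv_equiv track=rewrite | github.com/VremeniNet/itmo_python | Laboratory work 2/main.py | guess_binary
-- ===== SOURCE A (Python) =====
-- from typing import Iterable, List, Literal, Optional, Tuple
--
-- def guess_binary(target: int, pool: Iterable[int]) -> Optional[Tuple[int, int]]:
--     """Угадать число бинарным поиском.
--
--     Для корректной работы бинарного поиска данные сортируются (копия),
--     так как исходный список по условию может быть неотсортирован.
--     На каждом сравнении с элементом середины увеличивается счётчик попыток на 1.
--
--     Args:
--         target: Загаданное число, которое нужно угадать.
--         pool: Коллекция допустимых значений (без повторов).
--
--     Returns: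
--         (угаданное_число, число_попыток) или None, если target отсутствует
--         в пуле либо не найден бинарным поиском.
--     """
--     s = set(pool)
--     if target not in s:
--         return None
--
--     arr = sorted(s)
--     left, right = 0, len(arr) - 1
--     attempts = 0
--
--     while left <= right:
--         mid = (left + right) // 2
--         attempts += 1
--         if arr[mid] == target:
--             return arr[mid], attempts
--         if arr[mid] < target:
--             left = mid + 1
--         else:
--             right = mid - 1
--
--     return None
-- ===== SOURCE B (Python) =====
-- def guess_binary(target, pool):
--     """Rank-based, no sort: count distinct elements below target, then follow
--     the binary-search path arithmetically, recursing on (window size, rank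
--     position in window) only."""
--     s = set(pool)
--     if target not in s:
--         return None
--     r = sum(1 for x in s if x < target)
--
--     def go(n, r, attempts):
--         m = (n - 1) // 2
--         if m == r:
--             return target, attempts + 1
--         if m < r:
--             return go(n - m - 1, r - m - 1, attempts + 1)
--         return go(m, r, attempts + 1)
--
--     return go(len(s), r, 0)
-- ===== Notes on version B (the rewrite author's own statement) =====
-- stated objective: alternative
-- what changed: B never sorts and never touches the array in its search: it counts the distinct elements below the target (its rank) in one pass and then replays the binary-search path by recursion on the pair (window size, rank position) alone; O(n) vs A's O(n log n).
import Mathlib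
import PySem

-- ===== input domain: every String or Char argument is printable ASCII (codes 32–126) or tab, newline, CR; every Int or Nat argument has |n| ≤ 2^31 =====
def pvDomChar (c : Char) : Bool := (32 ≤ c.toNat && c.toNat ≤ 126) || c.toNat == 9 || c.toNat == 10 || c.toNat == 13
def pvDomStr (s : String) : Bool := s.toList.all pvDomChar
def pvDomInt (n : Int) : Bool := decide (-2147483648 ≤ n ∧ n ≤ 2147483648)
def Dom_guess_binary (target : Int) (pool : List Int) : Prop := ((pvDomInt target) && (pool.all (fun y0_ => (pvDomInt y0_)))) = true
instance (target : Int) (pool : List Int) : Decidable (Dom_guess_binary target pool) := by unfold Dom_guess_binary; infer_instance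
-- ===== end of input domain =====

-- B never sorts: it counts the distinct elements below the target (its rank) and replays the
-- binary-search path by recursion on (window size, rank position) alone (objective: alternative).

-- ===== PORT A =====
-- the while-loop of A: arr[mid] drives the comparisons; pyGet? none (IndexError) is unreachable
def pvLoopA (target : Int) (arr : List Int) (left right attempts : Int) : Option (Int × Int) :=
  if _h : left ≤ right then
    let mid := PySem.Int.floordiv (left + right) 2
    match PySem.List.pyGet? arr mid with
    | none => none
    | some v =>
      if v = target then some (v, attempts + 1)
      else if v < target then pvLoopA target arr (mid + 1) right (attempts + 1)
      else pvLoopA target arr left (mid - 1) (attempts + 1)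
  else none
termination_by (right + 1 - left).toNat
decreasing_by
  all_goals
    have hb := PySem.Int.floordiv_two_mid_bounds (lo := left) (hi := right) _h
    omega

def guess_binary (target : Int) (pool : List Int) : Option (Int × Int) :=
  let s := PySem.Set.ofList pool
  if target ∈ s then
    let arr := PySem.List.sorted s (fun x => x) false
    pvLoopA target arr 0 ((arr.length : Int) - 1) 0
  else none

-- ===== PORT B =====
-- B's inner recursion go(n, r, attempts): search for position r in a window of size n.
-- The Python recursion is total because 0 ≤ r < n always holds at a call; the 0 < n guard
-- only makes the Lean transcription terminate (unreachable-branch value none).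
def pvGoB (target n r attempts : Int) : Option (Int × Int) :=
  if h : 0 < n then
    let m := PySem.Int.floordiv (n - 1) 2
    if m = r then some (target, attempts + 1)
    else if m < r then pvGoB target (n - m - 1) (r - m - 1) (attempts + 1)
    else pvGoB target m r (attempts + 1)
  else none
termination_by n.toNat
decreasing_by
  all_goals
    have hb := PySem.Int.floordiv_two_mid_bounds (lo := 0) (hi := n - 1) (by omega)
    simp only [zero_add] at hb
    omega

def guess_binary_alt (target : Int) (pool : List Int) : Option (Int × Int) :=
  let s := PySem.Set.ofList pool
  if target ∈ s then
    let r : Int := (s.countP (fun x => decide (x < target)) : Int)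
    pvGoB target (s.length : Int) r 0
  else none

-- ===== PRECONDITION & SPEC =====
def Spec_guess_binary (target : Int) (pool : List Int) (out : Option (Int × Int)) : Prop := out = guess_binary_alt target pool
instance (target : Int) (pool : List Int) (out : Option (Int × Int)) : Decidable (Spec_guess_binary target pool out) := by unfold Spec_guess_binary; infer_instance

-- ===== CLAIM (what is proved, stated in full; the proofs are below) =====
def Claim_equal_guess_binary : Prop := ∀ (target : Int) (pool : List Int), Dom_guess_binary target pool → Spec_guess_binary target pool (guess_binary target pool)

-- ===== LEMMAS AND PROOFS =====

-- a strictly increasing list containing target: the element at index k is the target iff k is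
-- the rank (count of elements below target), and is below target iff k is below the rank
theorem pv_rank_char (arr : List Int) (target : Int)
    (hs : arr.Pairwise (· < ·)) (hm : target ∈ arr) (k : Nat) (hk : k < arr.length) :
    (arr[k] = target ↔ k = arr.countP (fun x => decide (x < target))) ∧
    (arr[k] < target ↔ k < arr.countP (fun x => decide (x < target))) := by
  induction arr generalizing k with
  | nil => simp at hm
  | cons a t ih =>
    have hpt : t.Pairwise (· < ·) := hs.of_cons
    have hat : ∀ x ∈ t, a < x := by
      intro x hx; exact (List.pairwise_cons.mp hs).1 x hx
    by_cases hlt : a < target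
    · have hmt : target ∈ t := by
        rcases List.mem_cons.mp hm with heq | hmt
        · omega
        · exact hmt
      have hc : (a :: t).countP (fun x => decide (x < target)) =
          t.countP (fun x => decide (x < target)) + 1 := by
        simp [hlt]
      cases k with
      | zero =>
        simp only [List.getElem_cons_zero]
        rw [hc]
        constructor
        · constructor
          · intro h; omega
          · intro h; omega
        · constructor
          · intro _; omega
          · intro _; exact hlt
      | succ j =>
        have hj : j < t.length := by simpa using hk
        have := ih hpt hmt j hj
        simp only [List.getElem_cons_succ, hc]
        constructor
        · rw [this.1]; omega
        · rw [this.2]; omega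
    · -- a ≥ target; membership forces a = target, and everything in t is > target
      have ha : a = target := by
        rcases List.mem_cons.mp hm with heq | hmt
        · omega
        · exact absurd (hat target hmt) (by omega)
      have hc : (a :: t).countP (fun x => decide (x < target)) = 0 := by
        rw [List.countP_eq_zero]
        intro x hx
        rcases List.mem_cons.mp hx with rfl | hx'
        · simpa using hlt
        · have := hat x hx'; simp; omega
      cases k with
      | zero =>
        simp only [List.getElem_cons_zero]
        rw [hc]
        constructor
        · constructor
          · intro _; rfl
          · intro _; exact ha
        · constructor
          · intro h; omega
          · intro h; omega
      | succ j =>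
        have hj : j < t.length := by simpa using hk
        have hgt : target < t[j] := ha ▸ hat _ (List.getElem_mem hj)
        simp only [List.getElem_cons_succ]
        rw [hc]
        constructor
        · constructor
          · intro h; omega
          · intro h; omega
        · constructor
          · intro h; omega
          · intro h; omega

-- Python floor-division by 2 shifts by an integer offset
theorem pv_floordiv_shift (l r : Int) :
    PySem.Int.floordiv (l + r) 2 = l + PySem.Int.floordiv (r - l) 2 := by
  rw [PySem.Int.floordiv_eq_ediv_of_pos (by omega), PySem.Int.floordiv_eq_ediv_of_pos (by omega)]
  omega

-- A's index loop on the sorted array equals B's arithmetic recursion on (window size, rank offset)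
theorem pv_loop_eq (target : Int) (arr : List Int) (hs : arr.Pairwise (· < ·))
    (hm : target ∈ arr) :
    ∀ (k : Nat) (left right attempts : Int), (right + 1 - left).toNat = k →
    0 ≤ left → right < (arr.length : Int) →
    pvLoopA target arr left right attempts =
      pvGoB target (right + 1 - left)
        ((arr.countP (fun x => decide (x < target)) : Int) - left) attempts := by
  intro k
  induction k using Nat.strong_induction_on with
  | _ k ih =>
    intro left right attempts hkk hl hr
    rw [pvLoopA, pvGoB]
    by_cases h : left ≤ right
    · simp only [dif_pos h, dif_pos (show (0:Int) < right + 1 - left by omega)]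
      have hb := PySem.Int.floordiv_two_mid_bounds (lo := left) (hi := right) h
      set mid := PySem.Int.floordiv (left + right) 2 with hmid
      have hshift : PySem.Int.floordiv (right + 1 - left - 1) 2 = mid - left := by
        have := pv_floordiv_shift left right
        have h2 : right + 1 - left - 1 = right - left := by ring
        rw [h2]; omega
      have h0 : 0 ≤ mid := by omega
      have hlen : mid < (arr.length : Int) := by omega
      have hknat : mid.toNat < arr.length := by omega
      have hget : PySem.List.pyGet? arr mid = some arr[mid.toNat] :=
        PySem.List.pyGet?_eq_some_getElem arr h0 (by simpa using hlen)
      rw [hget]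
      dsimp only
      rw [hshift]
      set R : Int := (arr.countP (fun x => decide (x < target)) : Int) with hR
      have hrank := pv_rank_char arr target hs hm mid.toNat hknat
      by_cases he : arr[mid.toNat] = target
      · have : mid - left = R - left := by
          have := (hrank.1).mp he; omega
        rw [if_pos he, if_pos this, he]
      · have hne : ¬ mid - left = R - left := by
          intro hc
          exact he (hrank.1.mpr (by omega))
        rw [if_neg he, if_neg hne]
        by_cases hlt : arr[mid.toNat] < target
        · have hml : mid - left < R - left := by
            have := hrank.2.mp hlt; omega
          rw [if_pos hlt, if_pos hml]
          have := ih (right + 1 - (mid + 1)).toNat (by omega) (mid + 1) right (attempts + 1)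
            rfl (by omega) hr
          rw [this]
          congr 1 <;> omega
        · have hml : ¬ mid - left < R - left := by
            intro hc
            exact hlt (hrank.2.mpr (by omega))
          rw [if_neg hlt, if_neg hml]
          have := ih (mid - 1 + 1 - left).toNat (by omega) left (mid - 1) (attempts + 1)
            rfl hl (by omega)
          rw [this]
          congr 1 <;> omega
    · rw [dif_neg h, dif_neg (show ¬ (0:Int) < right + 1 - left by omega)]

-- ===== VERDICT (by name: the statement is the Claim_ definition above) =====
theorem guess_binary_spec : Claim_equal_guess_binary := by
  intro target pool _
  unfold Spec_guess_binary guess_binary guess_binary_alt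
  by_cases hmem : target ∈ PySem.Set.ofList pool
  · simp only [if_pos hmem]
    set s := PySem.Set.ofList pool with hsdef
    set arr := PySem.List.sorted s (fun x => x) false with harr
    have hperm : arr.Perm s := PySem.List.sorted_perm s (fun x => x) false
    have hpw : arr.Pairwise (· < ·) := PySem.List.sorted_ofList_pairwise_lt pool
    have hmem' : target ∈ arr := hperm.mem_iff.mpr hmem
    have hlen : arr.length = s.length := hperm.length_eq
    have hcnt : arr.countP (fun x => decide (x < target)) =
        s.countP (fun x => decide (x < target)) := hperm.countP_eq _
    rw [pv_loop_eq target arr hpw hmem' _ 0 ((arr.length : Int) - 1) 0 rfl (by omega)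
      (by omega), hcnt, hlen]
    congr 1 <;> omega
  · simp only [if_neg hmem]
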